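-- pv_equiv track=rewrite | github.com/aatifj/HuaweiSCDRDecoder | scdrconvert.py | convert_listoftrafficvolumes
-- ===== SOURCE A (Python) =====
-- def convert_listoftrafficvolumes(trafficvolumebytes):
--     qos_requested = None
--     qos_negotiated = None
--     gprs_uplink_total = 0
--     gprs_downlink_total = 0
--     changeofchar_index = 1  # Initialize the ChangeofChar index
--
--     while len(trafficvolumebytes) >= 3 and trafficvolumebytes[0] == 0x30:
--         # Read the ChangeofCharCondition length from the second byte
--         changeofcharcondition_length = trafficvolumebytes[1]
--
--         # Check if there are enough bytes to read the entire ChangeofCharCondition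
--         if len(trafficvolumebytes) >= 2 + changeofcharcondition_length:
--             # Extract the ChangeofCharCondition value
--             changeofcharcondition_value = trafficvolumebytes[2:2 + changeofcharcondition_length]
--
--             i = 0
--             while i < len(changeofcharcondition_value):
--                 # Read the tag and length
--                 tag = changeofcharcondition_value[i]
--                 length = changeofcharcondition_value[i + 1]
--
--                 # Extract the value bytes
--                 value = changeofcharcondition_value[i + 2:i + 2 + length]
--
--                 if tag == 0x81:  # qosRequested
--                     qos_requested = ''.join(nibble for byte in value for nibble in f'{byte:02X}')
--                 elif tag == 0x82:  # qosNegotiated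
--                     qos_negotiated = ''.join(nibble for byte in value for nibble in f'{byte:02X}')
--                 elif tag == 0x83:  # datavolumeGPRSUplink
--                     gprs_uplink_total += int.from_bytes(value, byteorder='big')
--                 elif tag == 0x84:  # datavolumeGPRSDownlink
--                     gprs_downlink_total += int.from_bytes(value, byteorder='big')
--
--                 # Move the index to the next TLV
--                 i += 2 + length
--
--             # Increment the ChangeofChar index
--             changeofchar_index += 1
--
--             # Remove the processed ChangeofCharCondition from the byte array
--             trafficvolumebytes = trafficvolumebytes[2 + changeofcharcondition_length:]
--         else:
--             # If there are not enough bytes to read the full ChangeofCharCondition, exit the loop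
--             break
--
--     # Return the accumulated values
--     result = {}
--     if qos_requested is not None:
--         result['qoSRequested'] = qos_requested
--     if qos_negotiated is not None:
--         result['qoSNegotiated'] = qos_negotiated
--     result['DataVolumeGPRSUplink'] = str(gprs_uplink_total)
--     result['DataVolumeGPRSDownlink'] =str(gprs_downlink_total)
--
--     return result
-- ===== SOURCE B (Python) =====
-- def convert_listoftrafficvolumes(trafficvolumebytes):
--     # Pass 1: collect every (tag, value) TLV from the ChangeofCharCondition blocks.
--     tlvs = []
--     data = trafficvolumebytes
--     while len(data) >= 3 and data[0] == 0x30: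
--         blen = data[1]
--         if len(data) < 2 + blen:
--             break
--         block = data[2:2 + blen]
--         i = 0
--         while i < len(block):
--             tag = block[i]
--             length = block[i + 1]
--             tlvs.append((tag, block[i + 2:i + 2 + length]))
--             i += 2 + length
--         data = data[2 + blen:]
--     # Pass 2: fold the flat TLV list into the accumulators (last QoS wins).
--     qos_requested = None
--     qos_negotiated = None
--     uplink = 0
--     downlink = 0
--     for tag, value in tlvs:
--         if tag == 0x81:
--             qos_requested = ''.join(f'{b:02X}' for b in value)
--         elif tag == 0x82:
--             qos_negotiated = ''.join(f'{b:02X}' for b in value)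
--         elif tag == 0x83:
--             uplink += int.from_bytes(value, byteorder='big')
--         elif tag == 0x84:
--             downlink += int.from_bytes(value, byteorder='big')
--     result = {}
--     if qos_requested is not None:
--         result['qoSRequested'] = qos_requested
--     if qos_negotiated is not None:
--         result['qoSNegotiated'] = qos_negotiated
--     result['DataVolumeGPRSUplink'] = str(uplink)
--     result['DataVolumeGPRSDownlink'] = str(downlink)
--     return result
-- ===== Notes on version B (the rewrite author's own statement) =====
-- stated objective: alternative
-- what changed: Replaces A's fused walk (inline tag dispatch while consuming blocks) by a two-pass decomposition: pass one collects all (tag, value) TLVs of every block into one flat list, pass two folds that list into the QoS strings and the uplink/downlink totals.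
import Mathlib
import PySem

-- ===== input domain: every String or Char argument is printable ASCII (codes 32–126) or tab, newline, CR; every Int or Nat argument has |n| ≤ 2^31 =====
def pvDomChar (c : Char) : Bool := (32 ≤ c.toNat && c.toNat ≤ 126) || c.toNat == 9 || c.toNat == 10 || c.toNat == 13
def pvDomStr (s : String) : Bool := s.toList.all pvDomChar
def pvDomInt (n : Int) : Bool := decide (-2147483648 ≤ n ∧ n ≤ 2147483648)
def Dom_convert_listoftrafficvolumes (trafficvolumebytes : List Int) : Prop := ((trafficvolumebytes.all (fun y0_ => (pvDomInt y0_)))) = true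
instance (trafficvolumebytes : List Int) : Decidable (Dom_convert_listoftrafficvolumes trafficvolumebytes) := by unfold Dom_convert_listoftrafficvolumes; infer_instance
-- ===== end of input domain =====

-- B re-decomposes A's fused TLV walk into two passes (collect all (tag,value) TLVs, then fold them);
-- objective: alternative decomposition, same cost. Return values proved equal; neither mutates its argument.

-- shared builtins: f'{b:02X}' and int.from_bytes(v, 'big') and the hex join
def pvHexDigit (n : Nat) : Char := if n < 10 then Char.ofNat (48 + n) else Char.ofNat (55 + n)

def pvHexNat (n : Nat) : List Char :=
  if n < 16 then [pvHexDigit n] else pvHexNat (n / 16) ++ [pvHexDigit (n % 16)]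
termination_by n
decreasing_by exact Nat.div_lt_self (by omega) (by omega)

-- Python format(b, '02X'): uppercase hex, zero-padded to width 2 (the sign counts toward the width)
def pvFmt02X (b : Int) : String :=
  if b < 0 then "-" ++ String.ofList (pvHexNat (-b).toNat)
  else if b < 16 then "0" ++ String.ofList (pvHexNat b.toNat)
  else String.ofList (pvHexNat b.toNat)

def pvHexJoin (v : List Int) : String := v.foldl (fun s b => s ++ pvFmt02X b) ""

def pvFromBytes (v : List Int) : Int := v.foldl (fun a b => a * 256 + b) 0

-- ===== PORT A =====
-- A's inner while: inline dispatch into (qos_requested, qos_negotiated, uplink, downlink); fuel only for totality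
def pvAInner : Nat → List Int → Int → (Option String × Option String × Int × Int) →
    (Option String × Option String × Int × Int)
  | 0, _, _, st => st
  | f + 1, v, i, st =>
    if i < (v.length : Int) then
      let tag := PySem.List.pyGetD v i 0
      let length := PySem.List.pyGetD v (i + 1) 0
      let value := PySem.List.slice v (some (i + 2)) (some (i + 2 + length))
      let st' :=
        if tag = 0x81 then (some (pvHexJoin value), st.2.1, st.2.2.1, st.2.2.2)
        else if tag = 0x82 then (st.1, some (pvHexJoin value), st.2.2.1, st.2.2.2)
        else if tag = 0x83 then (st.1, st.2.1, st.2.2.1 + pvFromBytes value, st.2.2.2)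
        else if tag = 0x84 then (st.1, st.2.1, st.2.2.1, st.2.2.2 + pvFromBytes value)
        else st
      pvAInner f v (i + 2 + length) st'
    else st

-- A's outer while: consume one 0x30 block per step (cc carries A's unused changeofchar_index)
def pvAOuter : Nat → List Int → Int → (Option String × Option String × Int × Int) →
    (Option String × Option String × Int × Int)
  | 0, _, _, st => st
  | f + 1, tv, cc, st =>
    if 3 ≤ tv.length ∧ PySem.List.pyGetD tv 0 0 = 0x30 then
      let L := PySem.List.pyGetD tv 1 0
      if 2 + L ≤ (tv.length : Int) then
        let value := PySem.List.slice tv (some 2) (some (2 + L))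
        pvAOuter f (PySem.List.slice tv (some (2 + L)) none) (cc + 1)
          (pvAInner (value.length + 1) value 0 st)
      else st
    else st

def convert_listoftrafficvolumes (trafficvolumebytes : List Int) : List (String × String) :=
  let st := pvAOuter (trafficvolumebytes.length + 1) trafficvolumebytes 1 (none, none, 0, 0)
  (match st.1 with | some s => [("qoSRequested", s)] | none => []) ++
  (match st.2.1 with | some s => [("qoSNegotiated", s)] | none => []) ++
  [("DataVolumeGPRSUplink", PySem.Int.toStr st.2.2.1),
   ("DataVolumeGPRSDownlink", PySem.Int.toStr st.2.2.2)]

-- ===== PORT B =====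
-- pass 1, inner: append each (tag, value) of one block to the flat TLV list
def pvBInner : Nat → List Int → Int → List (Int × List Int) → List (Int × List Int)
  | 0, _, _, acc => acc
  | f + 1, v, i, acc =>
    if i < (v.length : Int) then
      let tag := PySem.List.pyGetD v i 0
      let length := PySem.List.pyGetD v (i + 1) 0
      pvBInner f v (i + 2 + length)
        (acc ++ [(tag, PySem.List.slice v (some (i + 2)) (some (i + 2 + length)))])
    else acc

-- pass 1, outer: same block guards as A, but only collecting TLVs
def pvBOuter : Nat → List Int → List (Int × List Int) → List (Int × List Int)
  | 0, _, acc => acc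
  | f + 1, tv, acc =>
    if 3 ≤ tv.length ∧ PySem.List.pyGetD tv 0 0 = 0x30 then
      let L := PySem.List.pyGetD tv 1 0
      if 2 + L ≤ (tv.length : Int) then
        let block := PySem.List.slice tv (some 2) (some (2 + L))
        pvBOuter f (PySem.List.slice tv (some (2 + L)) none)
          (pvBInner (block.length + 1) block 0 acc)
      else acc
    else acc

-- pass 2: fold one TLV into the accumulators
def pvStep (st : Option String × Option String × Int × Int) (tlv : Int × List Int) :
    Option String × Option String × Int × Int :=
  if tlv.1 = 0x81 then (some (pvHexJoin tlv.2), st.2.1, st.2.2.1, st.2.2.2)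
  else if tlv.1 = 0x82 then (st.1, some (pvHexJoin tlv.2), st.2.2.1, st.2.2.2)
  else if tlv.1 = 0x83 then (st.1, st.2.1, st.2.2.1 + pvFromBytes tlv.2, st.2.2.2)
  else if tlv.1 = 0x84 then (st.1, st.2.1, st.2.2.1, st.2.2.2 + pvFromBytes tlv.2)
  else st

def convert_listoftrafficvolumes_alt (trafficvolumebytes : List Int) : List (String × String) :=
  let tlvs := pvBOuter (trafficvolumebytes.length + 1) trafficvolumebytes []
  let st := tlvs.foldl pvStep (none, none, 0, 0)
  (match st.1 with | some s => [("qoSRequested", s)] | none => []) ++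
  (match st.2.1 with | some s => [("qoSNegotiated", s)] | none => []) ++
  [("DataVolumeGPRSUplink", PySem.Int.toStr st.2.2.1),
   ("DataVolumeGPRSDownlink", PySem.Int.toStr st.2.2.2)]

-- ===== PRECONDITION & SPEC =====
-- Pre_ excludes inputs with a negative length byte (on which A can loop forever, raise IndexError,
-- or — on a few stragglers — return the same value B returns), a block whose last byte is a tag
-- with no length byte (IndexError), and values out of byte range 0..255 under tags 0x83/0x84 (ValueError).
-- structural recursion on a bound n ≥ list length (so the predicate is kernel-decidable);
-- the bound is always sufficient, never a semantic cap
def pvPreBlock : Nat → List Int → Bool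
  | _, [] => true
  | _, [_] => false
  | 0, _ :: _ :: _ => true
  | n + 1, t :: l :: rest =>
    decide (0 ≤ l) &&
    (!(t == 0x83 || t == 0x84) || (rest.take l.toNat).all (fun b => decide (0 ≤ b ∧ b < 256))) &&
    pvPreBlock n (rest.drop l.toNat)

def pvPreOuter : Nat → List Int → Bool
  | 0, _ => true
  | n + 1, tv =>
    if 3 ≤ tv.length ∧ tv.getD 0 0 = 0x30 then
      let L := tv.getD 1 0
      if 0 ≤ L then
        if 2 + L ≤ (tv.length : Int) then
          pvPreBlock tv.length ((tv.take (2 + L).toNat).drop 2) &&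
          pvPreOuter n (tv.drop (2 + L).toNat)
        else true
      else false
    else true

def Pre_convert_listoftrafficvolumes (trafficvolumebytes : List Int) : Prop :=
  pvPreOuter (trafficvolumebytes.length + 1) trafficvolumebytes = true
instance (trafficvolumebytes : List Int) : Decidable (Pre_convert_listoftrafficvolumes trafficvolumebytes) := by
  unfold Pre_convert_listoftrafficvolumes; infer_instance

def pvWitness_convert_listoftrafficvolumes : List Int := [48, 7, 129, 1, 7, 131, 2, 1, 0]

def Spec_convert_listoftrafficvolumes (trafficvolumebytes : List Int) (out : List (String × String)) : Prop :=
  out = convert_listoftrafficvolumes_alt trafficvolumebytes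
instance (trafficvolumebytes : List Int) (out : List (String × String)) : Decidable (Spec_convert_listoftrafficvolumes trafficvolumebytes out) := by
  unfold Spec_convert_listoftrafficvolumes; infer_instance

-- ===== CLAIM (what is proved, stated in full; the proofs are below) =====
def Claim_equal_convert_listoftrafficvolumes : Prop :=
  ∀ (trafficvolumebytes : List Int), Dom_convert_listoftrafficvolumes trafficvolumebytes →
    Pre_convert_listoftrafficvolumes trafficvolumebytes →
    Spec_convert_listoftrafficvolumes trafficvolumebytes (convert_listoftrafficvolumes trafficvolumebytes)

-- ===== LEMMAS AND PROOFS =====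

-- folding the TLVs B's inner collects equals A's fused inner loop
lemma pv_inner_eq (f : Nat) : ∀ (v : List Int) (i : Int) (acc : List (Int × List Int))
    (st : Option String × Option String × Int × Int),
    (pvBInner f v i acc).foldl pvStep st = pvAInner f v i (acc.foldl pvStep st) := by
  induction f with
  | zero => intro v i acc st; simp [pvBInner, pvAInner]
  | succ f ih =>
    intro v i acc st
    simp only [pvBInner, pvAInner]
    split
    · rw [ih, List.foldl_append]
      simp [pvStep]
    · rfl

-- folding the TLVs B's outer collects equals A's fused outer loop (any changeofchar index cc)
lemma pv_outer_eq (f : Nat) : ∀ (tv : List Int) (cc : Int) (acc : List (Int × List Int))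
    (st : Option String × Option String × Int × Int),
    (pvBOuter f tv acc).foldl pvStep st = pvAOuter f tv cc (acc.foldl pvStep st) := by
  induction f with
  | zero => intro tv cc acc st; simp [pvBOuter, pvAOuter]
  | succ f ih =>
    intro tv cc acc st
    simp only [pvBOuter, pvAOuter]
    split
    · split
      · rw [ih _ (cc + 1), pv_inner_eq]
      · rfl
    · rfl

-- ===== VERDICT (by name: the statement is the Claim_ definition above) =====
theorem convert_listoftrafficvolumes_spec : Claim_equal_convert_listoftrafficvolumes := by
  intro tv _ _
  unfold Spec_convert_listoftrafficvolumes convert_listoftrafficvolumes convert_listoftrafficvolumes_alt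
  have h := pv_outer_eq (tv.length + 1) tv 1 [] (none, none, 0, 0)
  simp only [List.foldl_nil] at h
  exact congrArg (fun st : Option String × Option String × Int × Int =>
    (match st.1 with | some s => [("qoSRequested", s)] | none => ([] : List (String × String))) ++
    (match st.2.1 with | some s => [("qoSNegotiated", s)] | none => []) ++
    [("DataVolumeGPRSUplink", PySem.Int.toStr st.2.2.1),
     ("DataVolumeGPRSDownlink", PySem.Int.toStr st.2.2.2)]) h.symm
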